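-- pv_equiv track=rewrite | github.com/Teliosporegenusasio343/AetherSwap | app/repair_error_records.py | _filter_list_by_record_names
-- ===== SOURCE A (Python) =====
-- from collections import defaultdict
--
-- def _gather_candidates_for_record_name(record_name: str, name_to_candidates: dict) -> list:
--     exact = list(name_to_candidates.get(record_name) or [])
--     prefix_match = []
--     for list_name, cands in name_to_candidates.items():
--         if list_name == record_name:
--             continue
--         if record_name.startswith(list_name + " "):
--             prefix_match.extend(cands)
--     combined = exact + prefix_match
--     combined.sort(key=lambda x: (0 if x["source"] == "sold" else 1 if x["source"] == "listing" else 2, x["assetid"]))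
--     return combined
--
-- def _filter_list_by_record_names(name_to_candidates: dict, record_name_counts: dict) -> dict:
--     filtered = defaultdict(list)
--     for name, need_count in record_name_counts.items():
--         if need_count <= 0:
--             continue
--         candidates = _gather_candidates_for_record_name(name, name_to_candidates)[:need_count]
--         filtered[name] = list(candidates)
--     return filtered
-- ===== SOURCE B (Python) =====
-- from collections import defaultdict
--
--
-- def _filter_list_by_record_names(name_to_candidates: dict, record_name_counts: dict) -> dict:
--     # Index each dict key by its insertion position once; per record name only the
--     # space-boundary prefixes of the name are looked up directly, so the inner scan
--     # over the whole dict disappears.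
--     pos = {k: i for i, k in enumerate(name_to_candidates)}
--     cands_by_pos = list(name_to_candidates.values())
--     filtered = defaultdict(list)
--     for name, need_count in record_name_counts.items():
--         if need_count <= 0:
--             continue
--         exact = list(name_to_candidates.get(name) or [])
--         hits = []
--         for i, ch in enumerate(name):
--             if ch == " ":
--                 j = pos.get(name[:i])
--                 if j is not None:
--                     hits.append(j)
--         combined = exact
--         for j in sorted(hits):
--             combined = combined + cands_by_pos[j]
--         combined.sort(key=lambda x: (0 if x["source"] == "sold" else 1 if x["source"] == "listing" else 2, x["assetid"]))
--         filtered[name] = combined[:need_count]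
--     return filtered
-- ===== Notes on version B (the rewrite author's own statement) =====
-- stated objective: faster
-- what changed: Instead of scanning every candidate-dict key for each record name, B builds a key-to-position index of the dict once and looks up only the space-boundary prefixes of each record name directly, sorting the hit positions so the dict-insertion-order tie stability of the final stable sort is preserved.
import Mathlib
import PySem

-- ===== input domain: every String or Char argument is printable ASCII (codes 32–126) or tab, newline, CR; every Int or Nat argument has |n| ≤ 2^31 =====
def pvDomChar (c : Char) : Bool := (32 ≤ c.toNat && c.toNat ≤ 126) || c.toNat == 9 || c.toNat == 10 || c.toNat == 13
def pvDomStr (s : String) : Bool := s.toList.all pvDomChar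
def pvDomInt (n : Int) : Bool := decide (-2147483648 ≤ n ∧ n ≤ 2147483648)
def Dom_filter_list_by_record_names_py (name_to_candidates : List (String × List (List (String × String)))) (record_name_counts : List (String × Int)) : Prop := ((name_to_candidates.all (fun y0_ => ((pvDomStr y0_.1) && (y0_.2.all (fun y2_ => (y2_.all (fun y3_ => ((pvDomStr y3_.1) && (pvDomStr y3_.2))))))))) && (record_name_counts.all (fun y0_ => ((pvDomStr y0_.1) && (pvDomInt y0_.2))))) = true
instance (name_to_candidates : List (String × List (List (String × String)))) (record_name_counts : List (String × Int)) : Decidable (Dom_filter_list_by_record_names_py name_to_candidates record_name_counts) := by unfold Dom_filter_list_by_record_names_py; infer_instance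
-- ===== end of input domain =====

-- B replaces A's per-record scan of the whole candidate dict by direct lookups of the
-- record name's space-boundary prefixes in a position index (objective: faster).
-- Equivalence is about the RETURN value; neither program mutates its arguments.

-- ===== PORT A =====
-- shared sort key of both Pythons: (0/1/2 by "source", then "assetid"); the Python
-- x["source"] / x["assetid"] raise KeyError on a missing key — Pre_ excludes that,
-- so the getD "" default is never the compared value on admitted inputs.
def pvKeyOf (x : List (String × String)) : Lex (Int × String) :=
  toLex
    ((if (PySem.Dict.mk x).getD "source" "" = "sold" then 0
      else if (PySem.Dict.mk x).getD "source" "" = "listing" then 1 else 2 : Int),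
     (PySem.Dict.mk x).getD "assetid" "")

-- _gather_candidates_for_record_name: exact hits, then a full scan for prefix hits, then sort
def pvGatherA (record_name : String)
    (name_to_candidates : List (String × List (List (String × String)))) :
    List (List (String × String)) :=
  let exact0 := ((PySem.Dict.mk name_to_candidates).get? record_name).getD []
  let prefix_match := name_to_candidates.foldl
    (fun acc p =>
      if p.1 = record_name then acc
      else if PySem.Chars.startswith record_name.toList (p.1.toList ++ [' ']) then acc ++ p.2
      else acc) []
  PySem.List.sorted (exact0 ++ prefix_match) pvKeyOf

def filter_list_by_record_names_py (name_to_candidates : List (String × List (List (String × String)))) (record_name_counts : List (String × Int)) : List (String × List (List (String × String))) :=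
  (record_name_counts.foldl
    (fun (filtered : PySem.Dict String (List (List (String × String)))) p =>
      if p.2 ≤ 0 then filtered
      else filtered.insert p.1 (PySem.List.slice (pvGatherA p.1 name_to_candidates) none (some p.2)))
    PySem.Dict.empty).items

-- ===== PORT B =====
-- pos = {k: i for i, k in enumerate(name_to_candidates)}  (keys as List Char: equal strings = equal char lists)
def pvPosB (name_to_candidates : List (String × List (List (String × String)))) :
    PySem.Dict (List Char) Int :=
  (PySem.List.enumerate (name_to_candidates.map (·.1))).foldl
    (fun (d : PySem.Dict (List Char) Int) q => d.insert q.2.toList q.1) PySem.Dict.empty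

-- hits = positions of the space-boundary prefixes of name that are dict keys (name[:i] = take i on ASCII)
def pvHitsB (name : String) (pos : PySem.Dict (List Char) Int) : List Int :=
  (PySem.List.enumerate name.toList).foldl
    (fun acc q =>
      if q.2 = ' ' then
        match pos.get? (name.toList.take q.1.toNat) with
        | some j => acc ++ [j]
        | none => acc
      else acc) []

def filter_list_by_record_names_py_alt (name_to_candidates : List (String × List (List (String × String)))) (record_name_counts : List (String × Int)) : List (String × List (List (String × String))) :=
  let pos := pvPosB name_to_candidates
  let cands_by_pos := name_to_candidates.map (·.2)
  (record_name_counts.foldl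
    (fun (filtered : PySem.Dict String (List (List (String × String)))) p =>
      if p.2 ≤ 0 then filtered
      else
        let exact0 := ((PySem.Dict.mk name_to_candidates).get? p.1).getD []
        let combined := (PySem.List.sorted (pvHitsB p.1 pos) (fun j => j)).foldl
          (fun acc j => acc ++ PySem.List.pyGetD cands_by_pos j []) exact0
        filtered.insert p.1 (PySem.List.slice (PySem.List.sorted combined pvKeyOf) none (some p.2)))
    PySem.Dict.empty).items

-- ===== PRECONDITION & SPEC =====
-- Pre_ excludes (a) association lists whose name_to_candidates keys are not distinct — such inputs
-- cannot arise from a Python dict — and (b) inputs on which Python A raises KeyError: a candidate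
-- that is sorted for some requested name (need_count > 0, exact or prefix match) but lacks a
-- "source" or "assetid" key.
def Pre_filter_list_by_record_names_py (name_to_candidates : List (String × List (List (String × String)))) (record_name_counts : List (String × Int)) : Prop :=
  (name_to_candidates.map (·.1)).Nodup ∧
  ∀ p ∈ record_name_counts, 0 < p.2 →
    ∀ q ∈ name_to_candidates,
      (q.1 = p.1 ∨ PySem.Chars.startswith p.1.toList (q.1.toList ++ [' ']) = true) →
      ∀ c ∈ q.2,
        ((PySem.Dict.mk c).contains "source" = true ∧ (PySem.Dict.mk c).contains "assetid" = true)
instance (name_to_candidates : List (String × List (List (String × String)))) (record_name_counts : List (String × Int)) : Decidable (Pre_filter_list_by_record_names_py name_to_candidates record_name_counts) := by unfold Pre_filter_list_by_record_names_py; infer_instance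

def pvWitness_filter_list_by_record_names_py : (List (String × List (List (String × String)))) × (List (String × Int)) :=
  ([("ak 47", [[("source", "sold"), ("assetid", "2")]]),
    ("ak", [[("source", "listing"), ("assetid", "1")]])],
   [("ak 47", 3), ("m4", 1)])

def Spec_filter_list_by_record_names_py (name_to_candidates : List (String × List (List (String × String)))) (record_name_counts : List (String × Int)) (out : List (String × List (List (String × String)))) : Prop := out = filter_list_by_record_names_py_alt name_to_candidates record_name_counts
instance (name_to_candidates : List (String × List (List (String × String)))) (record_name_counts : List (String × Int)) (out : List (String × List (List (String × String)))) : Decidable (Spec_filter_list_by_record_names_py name_to_candidates record_name_counts out) := by unfold Spec_filter_list_by_record_names_py; infer_instance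

-- ===== CLAIM (what is proved, stated in full; the proofs are below) =====
def Claim_equal_filter_list_by_record_names_py : Prop := ∀ (name_to_candidates : List (String × List (List (String × String)))) (record_name_counts : List (String × Int)), Dom_filter_list_by_record_names_py name_to_candidates record_name_counts → Pre_filter_list_by_record_names_py name_to_candidates record_name_counts → Spec_filter_list_by_record_names_py name_to_candidates record_name_counts (filter_list_by_record_names_py name_to_candidates record_name_counts)

-- ===== LEMMAS AND PROOFS =====

theorem pvHits_eq_filterMap' (l : List (Int × Char)) (h : Int → Char → Option Int)
    (init : List Int) :
    l.foldl (fun acc q =>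
      if q.2 = ' ' then
        match h q.1 q.2 with
        | some j => acc ++ [j]
        | none => acc
      else acc) init
    = init ++ l.filterMap (fun q => if q.2 = ' ' then h q.1 q.2 else none) := by
  induction l generalizing init with
  | nil => simp
  | cons a t ih =>
      obtain ⟨i, c⟩ := a
      simp only [List.foldl_cons, List.filterMap_cons]
      by_cases hc : c = ' '
      · subst hc
        cases hj : h i ' '
        · simp [ih]
        · simp [ih]
      · simp [hc, ih]

theorem pvFoldA_eq_flatMap (name : String)
    (l : List (String × List (List (String × String)))) (init : List (List (String × String))) :
    l.foldl (fun acc p =>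
      if p.1 = name then acc
      else if PySem.Chars.startswith name.toList (p.1.toList ++ [' ']) then acc ++ p.2
      else acc) init
    = init ++ (l.filter
        (fun p => PySem.Chars.startswith name.toList (p.1.toList ++ [' ']))).flatMap (·.2) := by
  induction l generalizing init with
  | nil => simp
  | cons a t ih =>
      obtain ⟨k, v⟩ := a
      simp only [List.foldl_cons, List.filter_cons]
      by_cases he : k = name
      · subst he
        have hsw : PySem.Chars.startswith k.toList (k.toList ++ [' ']) = false := by
          rw [Bool.eq_false_iff]
          intro hs
          have hpre := (PySem.Chars.startswith_iff _ _).1 hs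
          have hlen := hpre.length_le
          simp at hlen
        simp [hsw, ih]
      · by_cases hs : PySem.Chars.startswith name.toList (k.toList ++ [' ']) = true
        · simp [he, hs, ih]
        · simp [he, hs, ih]

theorem pvSW_iff (nm k : List Char) :
    PySem.Chars.startswith nm (k ++ [' ']) = true ↔
      ∃ i, ∃ _ : i < nm.length, nm[i] = ' ' ∧ k = nm.take i := by
  rw [PySem.Chars.startswith_iff]
  constructor
  · rintro ⟨t, ht⟩
    subst ht
    refine ⟨k.length, by simp, by simp, ?_⟩
    rw [List.append_assoc]; exact (List.take_left' rfl).symm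
  · rintro ⟨i, hi, hsp, hk⟩
    subst hk
    have h1 : nm.take i ++ [' '] = nm.take (i + 1) := by
      rw [List.take_add_one]
      simp [List.getElem?_eq_getElem hi, hsp]
    rw [h1]
    exact List.take_prefix _ _

theorem pvRange_filter_flatMap {α β : Type} (l : List α) (p : α → Bool) (f : α → List β) (d : α) :
    ((List.range l.length).filter (fun n => p (l.getD n d))).flatMap (fun n => f (l.getD n d))
    = (l.filter p).flatMap f := by
  induction l with
  | nil => simp
  | cons a t ih =>
      have hps : ((fun n => p ((a :: t).getD n d)) ∘ Nat.succ) = fun n => p (t.getD n d) := by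
        funext n; simp
      rw [List.length_cons, List.range_succ_eq_map, List.filter_cons]
      by_cases hp : p a
      · rw [if_pos (by simpa using hp), List.flatMap_cons, List.filter_map, hps,
          List.flatMap_map]
        simp only [List.getD_cons_zero, Nat.succ_eq_add_one, List.getD_cons_succ]
        rw [ih, List.filter_cons, if_pos hp, List.flatMap_cons]
      · rw [if_neg (by simpa using hp), List.filter_map, hps, List.flatMap_map]
        simp only [Nat.succ_eq_add_one, List.getD_cons_succ]
        rw [ih, List.filter_cons, if_neg hp]

theorem pvPos_keys_nodup_map (ntc : List (String × List (List (String × String))))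
    (hnd : (ntc.map (·.1)).Nodup) :
    ((PySem.List.enumerate (ntc.map (·.1))).map (fun q => q.2.toList)).Nodup := by
  have h1 : (PySem.List.enumerate (ntc.map (·.1))).map (fun q => q.2.toList)
      = (ntc.map (·.1)).map String.toList := by
    rw [show (fun (q : Int × String) => q.2.toList) = (String.toList ∘ fun q => q.2) from rfl,
      ← List.map_map, PySem.List.map_snd_enumerate]
  rw [h1]
  exact hnd.map (fun a b h => String.toList_injective h)

theorem pvPos_items (ntc : List (String × List (List (String × String))))
    (hnd : (ntc.map (·.1)).Nodup) :
    (pvPosB ntc).items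
      = (PySem.List.enumerate (ntc.map (·.1))).map (fun q => (q.2.toList, q.1)) := by
  have h := PySem.Dict.items_foldl_insert_fresh (PySem.List.enumerate (ntc.map (·.1)))
    (fun q => q.2.toList) (fun q => q.1) PySem.Dict.empty
    (fun a _ => PySem.Dict.contains_empty _) (pvPos_keys_nodup_map ntc hnd)
  simpa [PySem.Dict.empty] using h

theorem pvPos_get (ntc : List (String × List (List (String × String))))
    (hnd : (ntc.map (·.1)).Nodup) (k : List Char) (j : Int) :
    (pvPosB ntc).get? k = some j ↔
      ∃ n, ∃ _ : n < ntc.length, j = (n : Int) ∧ k = (ntc[n]).1.toList := by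
  have hkeys : (pvPosB ntc).keys.Nodup := by
    have : (pvPosB ntc).keys
        = (PySem.List.enumerate (ntc.map (·.1))).map (fun q => q.2.toList) := by
      simp only [PySem.Dict.keys, pvPos_items ntc hnd, List.map_map]
      rfl
    rw [this]
    exact pvPos_keys_nodup_map ntc hnd
  rw [PySem.Dict.get?_eq_some_iff_mem_items _ _ _ hkeys, pvPos_items ntc hnd]
  simp only [List.mem_map, PySem.List.mem_enumerate_iff]
  constructor
  · rintro ⟨q, ⟨n, hn, rfl⟩, hq⟩
    simp only [Prod.mk.injEq] at hq
    refine ⟨n, by simpa using hn, ?_, ?_⟩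
    · omega
    · rw [← hq.1]
      congr 1
      simp
  · rintro ⟨n, hn, rfl, rfl⟩
    refine ⟨((n : Int), (ntc.map (·.1))[n]'(by simpa using hn)), ⟨n, by simpa using hn, by simp⟩, ?_⟩
    simp

theorem pvEnum_nodup (nm : List Char) : (PySem.List.enumerate nm).Nodup :=
  (PySem.List.pairwise_lt_enumerate nm 0).imp
    (fun h e => absurd (e ▸ h) (lt_irrefl _))

theorem pvHitsB_eq (name : String) (pos : PySem.Dict (List Char) Int) :
    pvHitsB name pos = (PySem.List.enumerate name.toList).filterMap
      (fun q => if q.2 = ' ' then pos.get? (name.toList.take q.1.toNat) else none) := by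
  unfold pvHitsB
  exact pvHits_eq_filterMap' _ (fun i _ => pos.get? (name.toList.take i.toNat)) []

theorem pvGather_eq (ntc : List (String × List (List (String × String))))
    (hnd : (ntc.map (·.1)).Nodup) (name : String) :
    (PySem.List.sorted (pvHitsB name (pvPosB ntc)) (fun j => j)).foldl
        (fun acc j => acc ++ PySem.List.pyGetD (ntc.map (·.2)) j [])
        (((PySem.Dict.mk ntc).get? name).getD [])
    = ((PySem.Dict.mk ntc).get? name).getD [] ++
      (ntc.foldl (fun acc p =>
        if p.1 = name then acc
        else if PySem.Chars.startswith name.toList (p.1.toList ++ [' ']) then acc ++ p.2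
        else acc) []) := by
  rw [PySem.List.foldl_append_eq_flatMap, pvFoldA_eq_flatMap, List.nil_append]
  congr 1
  set Tn : List Nat := (List.range ntc.length).filter
    (fun n => PySem.Chars.startswith name.toList ((ntc.getD n ("", [])).1.toList ++ [' ']))
    with hTn
  have hTn_mem : ∀ n : Nat, n ∈ Tn ↔ ∃ _ : n < ntc.length,
      PySem.Chars.startswith name.toList ((ntc[n]).1.toList ++ [' ']) = true := by
    intro n
    rw [hTn, List.mem_filter, List.mem_range]
    constructor
    · rintro ⟨hlt, hsw⟩
      exact ⟨hlt, by rwa [List.getD_eq_getElem _ _ hlt] at hsw⟩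
    · rintro ⟨hlt, hsw⟩
      exact ⟨hlt, by rwa [List.getD_eq_getElem _ _ hlt]⟩
  have hTpair : (Tn.map Int.ofNat).Pairwise (· < ·) :=
    List.Pairwise.map _ (fun a b h => Int.ofNat_lt.mpr h)
      (List.Pairwise.filter _ List.pairwise_lt_range)
  have hTnodup : (Tn.map Int.ofNat).Nodup :=
    hTpair.imp (fun h => ne_of_lt h)
  have hhits_nodup : ((PySem.List.enumerate name.toList).filterMap
      (fun q => if q.2 = ' ' then (pvPosB ntc).get? (name.toList.take q.1.toNat) else none)).Nodup := by
    rw [List.filterMap_congr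
      (g := fun q : Int × Char => if q.2 = ' ' ∧ 0 ≤ q.1 ∧ q.1 < (name.toList.length : Int)
        then (pvPosB ntc).get? (name.toList.take q.1.toNat) else none)
      (fun q hq => by
        obtain ⟨i, hi, rfl⟩ := (PySem.List.mem_enumerate_iff _ _ _).1 hq
        simp only []
        by_cases hsp : (name.toList[i] : Char) = ' '
        · rw [if_pos hsp, if_pos ⟨hsp, by omega, by omega⟩]
        · rw [if_neg hsp, if_neg (fun hcon => hsp hcon.1)])]
    refine List.Nodup.filterMap ?_ (pvEnum_nodup name.toList)
    rintro ⟨i, c⟩ ⟨i', c'⟩ b hb hb'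
    by_cases h1 : c = ' ' ∧ 0 ≤ i ∧ i < (name.toList.length : Int)
    · rw [if_pos h1] at hb
      by_cases h2 : c' = ' ' ∧ 0 ≤ i' ∧ i' < (name.toList.length : Int)
      · rw [if_pos h2] at hb'
        rw [Option.mem_def, pvPos_get ntc hnd] at hb hb'
        obtain ⟨n, hn, hbn, hk⟩ := hb
        obtain ⟨n', hn', hbn', hk'⟩ := hb'
        have hnn : n = n' := by omega
        subst hnn
        rw [← hk'] at hk
        have hlen := congrArg List.length hk
        simp only [List.length_take] at hlen
        have : i = i' := by omega
        subst this
        simp [h1.1, h2.1]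
      · rw [if_neg h2] at hb'
        exact absurd hb' (by simp)
    · rw [if_neg h1] at hb
      exact absurd hb (by simp)
  have hsorted : PySem.List.sorted (pvHitsB name (pvPosB ntc)) (fun j => j)
      = Tn.map Int.ofNat := by
    apply PySem.List.sorted_eq_of_perm_of_pairwise_lt _ _ _ ?_ hTpair
    rw [pvHitsB_eq]
    rw [List.perm_ext_iff_of_nodup hTnodup hhits_nodup]
    intro j
    constructor
    · intro hj
      obtain ⟨n, hnmem, rfl⟩ := List.exists_of_mem_map hj
      rw [hTn_mem] at hnmem
      obtain ⟨hlt, hsw⟩ := hnmem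
      obtain ⟨i, hi, hsp, hpre⟩ := (pvSW_iff name.toList _).1 hsw
      refine List.mem_filterMap.2 ⟨(((0 : Int) + i), name.toList[i]),
        (PySem.List.mem_enumerate_iff _ _ _).2 ⟨i, hi, rfl⟩, ?_⟩
      have h0 : ((0 : Int) + i).toNat = i := by omega
      rw [if_pos hsp, h0, pvPos_get ntc hnd]
      exact ⟨n, hlt, rfl, hpre.symm⟩
    · intro hj
      obtain ⟨q, hqmem, hq⟩ := List.mem_filterMap.1 hj
      obtain ⟨i, hi, rfl⟩ := (PySem.List.mem_enumerate_iff _ _ _).1 hqmem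
      by_cases hsp : (name.toList[i] : Char) = ' '
      · rw [if_pos hsp] at hq
        have h0 : ((0 : Int) + i).toNat = i := by omega
        rw [h0, pvPos_get ntc hnd] at hq
        obtain ⟨n, hlt, rfl, hpre⟩ := hq
        refine List.mem_map_of_mem ?_
        rw [hTn_mem]
        exact ⟨hlt, (pvSW_iff name.toList _).2 ⟨i, hi, hsp, hpre.symm⟩⟩
      · rw [if_neg hsp] at hq
        exact absurd hq (by simp)
  rw [hsorted, List.flatMap_map]
  have hcongr : ∀ n ∈ Tn, PySem.List.pyGetD (ntc.map (·.2)) (Int.ofNat n) []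
      = (fun m => (ntc.getD m (("", []) : String × List (List (String × String)))).2) n := by
    intro n hn
    rw [hTn_mem] at hn
    obtain ⟨hlt, _⟩ := hn
    rw [show PySem.List.pyGetD (ntc.map (·.2)) (Int.ofNat n) []
        = PySem.List.pyGetD (ntc.map (·.2)) ((n : Int)) [] from rfl,
      PySem.List.pyGetD_natCast]
    rw [List.getD_eq_getElem _ _ (by simpa using hlt)]
    simp only []
    rw [List.getD_eq_getElem _ _ hlt]
    simp
  rw [List.flatMap_congr hcongr, hTn]
  exact pvRange_filter_flatMap ntc
    (fun q => PySem.Chars.startswith name.toList (q.1.toList ++ [' '])) (fun q => q.2) ("", [])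

-- ===== VERDICT (by name: the statement is the Claim_ definition above) =====
theorem filter_list_by_record_names_py_spec : Claim_equal_filter_list_by_record_names_py := by
  intro ntc rnc _hdom hpre
  unfold Spec_filter_list_by_record_names_py
  unfold filter_list_by_record_names_py filter_list_by_record_names_py_alt pvGatherA
  obtain ⟨hnd, -⟩ := hpre
  congr 1
  congr 1
  funext filtered p
  by_cases hc : p.2 ≤ 0
  · simp [hc]
  · simp only [if_neg hc]
    congr 2
    congr 1
    exact (pvGather_eq ntc hnd p.1).symm
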